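-- pv_equiv track=rewrite | github.com/dvjlabs/StazioneMeteoSitoWebFlask | codice_Flask.py | creaTabella
-- ===== SOURCE A (Python) =====
-- def creaTabella(dizionario):
--     table = ""
--     table += "<table class='w3-table w3-striped w3-bordered w3-hoverable'>"
--
--     lista = []
--     table += "<tr>"
--     for key in dizionario:
--         table += "<th>"
--         table += key
--         table += "</th>"
--         lista.append( dizionario[key] )
--     table += "</tr>"
--
--     listaPiuLunga = max(lista,key=len)
--     for n in range( len(listaPiuLunga) ):
--         table += "<tr>"
--         for value in lista:
--             v = "NULL"
--             if n < len(value) and value[n]: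
--                 v = str(value[n])
--             table += "<td>"
--             table += v
--             table += "</td>"
--         table += "</tr>"
--
--     table += "</table>"
--     return table
-- ===== SOURCE B (Python) =====
-- def creaTabella(dizionario):
--     cols = list(dizionario.values())
--     depth = max(len(c) for c in cols)  # ValueError on an empty dict, like A's max()
--     padded = [list(c) + [None] * (depth - len(c)) for c in cols]
--     header = "".join("<th>" + k + "</th>" for k in dizionario)
--     body = "".join(
--         "<tr>" + "".join("<td>" + (str(v) if v else "NULL") + "</td>" for v in row) + "</tr>"
--         for row in zip(*padded))
--     return ("<table class='w3-table w3-striped w3-bordered w3-hoverable'><tr>"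
--             + header + "</tr>" + body + "</table>")
-- ===== Notes on version B (the rewrite author's own statement) =====
-- stated objective: alternative
-- what changed: B pads the columns to equal length, transposes them into rows with zip and emits each row with ''.join, instead of A's index loop over range(max length) with a per-cell bounds check and string +=.
-- outside the precondition, e.g. on creaTabella({}): A raises ValueError, B raises ValueError
import Mathlib
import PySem

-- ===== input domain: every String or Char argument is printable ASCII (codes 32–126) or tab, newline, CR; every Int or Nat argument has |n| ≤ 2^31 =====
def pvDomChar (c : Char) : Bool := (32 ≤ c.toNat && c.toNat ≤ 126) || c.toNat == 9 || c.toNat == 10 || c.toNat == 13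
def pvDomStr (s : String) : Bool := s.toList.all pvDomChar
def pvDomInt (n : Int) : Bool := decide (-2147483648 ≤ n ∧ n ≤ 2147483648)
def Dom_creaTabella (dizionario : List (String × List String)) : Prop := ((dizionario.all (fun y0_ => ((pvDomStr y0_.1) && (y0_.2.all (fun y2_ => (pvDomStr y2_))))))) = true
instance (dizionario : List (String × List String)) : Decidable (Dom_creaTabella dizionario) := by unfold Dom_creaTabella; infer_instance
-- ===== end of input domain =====

-- B transposes the padded columns into rows (zip) and joins the pieces, instead of A's
-- index loop with a per-cell bounds check; objective: alternative decomposition.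

-- ===== PORT A =====
def creaTabella (dizionario : List (String × List String)) : String :=
  let table := "" ++ "<table class='w3-table w3-striped w3-bordered w3-hoverable'>"
  -- for key in dizionario: table += "<th>"+key+"</th>"; lista.append(dizionario[key])
  -- (dizionario[key] cannot raise KeyError here: the key comes from the dict itself)
  let st := dizionario.foldl
    (fun (st : String × List (List String)) kv =>
      (st.1 ++ "<th>" ++ kv.1 ++ "</th>",
       st.2 ++ [(PySem.Dict.mk dizionario).getD kv.1 []]))
    (table ++ "<tr>", ([] : List (List String)))
  let table := st.1 ++ "</tr>"
  let lista := st.2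
  -- listaPiuLunga = max(lista, key=len); none = ValueError on the empty dict, excluded by Pre_
  match PySem.List.max? lista (fun v => PySem.List.len v) with
  | none => ""
  | some listaPiuLunga =>
    let table := (PySem.List.pyRange 0 (PySem.List.len listaPiuLunga) 1).foldl
      (fun table n =>
        let table := table ++ "<tr>"
        let table := lista.foldl
          (fun table value =>
            -- v = "NULL"; if n < len(value) and value[n]: v = str(value[n])  (str of a str is itself)
            let v := if n < PySem.List.len value ∧ PySem.List.pyGetD value n "" ≠ ""
                     then PySem.List.pyGetD value n "" else "NULL"
            table ++ "<td>" ++ v ++ "</td>")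
          table
        table ++ "</tr>")
      table
    table ++ "</table>"

-- ===== PORT B =====
-- zip(*padded): the padded columns all have equal length, so zip is this head/tail transpose
-- (exact for the equal-length lists the padding produces; B calls it on nothing else).
def pvRowsOf : List (List (Option String)) → List (List (Option String))
  | [] => []
  | [] :: _ => []
  | (x :: c) :: cs =>
      (((x :: c) :: cs).map (fun l => l.headD none)) :: pvRowsOf (((x :: c) :: cs).map List.tail)
termination_by cols => (cols.headD []).length
decreasing_by simp

-- "<td>" + (str(v) if v else "NULL") + "</td>"  (v is None or a str; falsy = None or "")
def pvCell (v : Option String) : String :=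
  "<td>" ++ (match v with
             | some s => if s = "" then "NULL" else s
             | none => "NULL") ++ "</td>"

def creaTabella_alt (dizionario : List (String × List String)) : String :=
  let cols := dizionario.map Prod.snd
  -- depth = max(len(c) for c in cols); none = ValueError on the empty dict, excluded by Pre_
  match PySem.List.max? (cols.map (fun c => PySem.List.len c)) (fun x => x) with
  | none => ""
  | some depth =>
    let padded := cols.map (fun c => c.map some ++ List.replicate (depth.toNat - c.length) none)
    let header := PySem.Str.join "" (dizionario.map (fun kv => "<th>" ++ kv.1 ++ "</th>"))
    let body := PySem.Str.join ""
      ((pvRowsOf padded).map (fun row =>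
        "<tr>" ++ PySem.Str.join "" (row.map pvCell) ++ "</tr>"))
    "<table class='w3-table w3-striped w3-bordered w3-hoverable'><tr>"
      ++ header ++ "</tr>" ++ body ++ "</table>"

-- ===== PRECONDITION & SPEC =====
-- Pre_ excludes the empty dict, on which both A and B raise ValueError (max of an empty
-- sequence), and duplicate-key association lists, which represent no Python dict.
def Pre_creaTabella (dizionario : List (String × List String)) : Prop :=
  dizionario ≠ [] ∧ (dizionario.map Prod.fst).Nodup
instance (dizionario : List (String × List String)) : Decidable (Pre_creaTabella dizionario) := by
  unfold Pre_creaTabella; infer_instance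
def pvWitness_creaTabella : (List (String × List String)) := [("a", ["1", ""]), ("b", ["x"])]

def Spec_creaTabella (dizionario : List (String × List String)) (out : String) : Prop :=
  out = creaTabella_alt dizionario
instance (dizionario : List (String × List String)) (out : String) : Decidable (Spec_creaTabella dizionario out) := by
  unfold Spec_creaTabella; infer_instance

-- ===== CLAIM (what is proved, stated in full; the proofs are below) =====
def Claim_equal_creaTabella : Prop := ∀ (dizionario : List (String × List String)),
  Dom_creaTabella dizionario → Pre_creaTabella dizionario →
  Spec_creaTabella dizionario (creaTabella dizionario)

-- ===== LEMMAS AND PROOFS =====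

theorem join0_nil : PySem.Str.join "" [] = "" := by decide

theorem join0_cons (x : String) (xs : List String) :
    PySem.Str.join "" (x :: xs) = x ++ PySem.Str.join "" xs := by
  cases xs with
  | nil => simp [PySem.Str.join, PySem.Chars.join_singleton, PySem.Chars.join_nil]
  | cons b r => simp [PySem.Str.join, PySem.Chars.join_cons_cons]

/-- a `table += piece(x)` loop is `init + "".join(pieces)` -/
theorem foldl_strapp {α : Type} (l : List α) (f : α → String) (init : String) :
    l.foldl (fun t x => t ++ f x) init = init ++ PySem.Str.join "" (l.map f) := by
  induction l generalizing init with
  | nil => simp [join0_nil]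
  | cons a t ih => simp [ih, join0_cons, String.append_assoc]

/-- first-match lookup of a key of a nodup association list yields that pair's value -/
theorem lookup_self (diz : List (String × List String)) (h : (diz.map Prod.fst).Nodup)
    (kv : String × List String) (hm : kv ∈ diz) :
    (PySem.Dict.mk diz).getD kv.1 [] = kv.2 := by
  induction diz with
  | nil => cases hm
  | cons a t ih =>
    obtain ⟨k0, v0⟩ := a
    simp only [List.map_cons, List.nodup_cons] at h
    rcases List.mem_cons.mp hm with rfl | hmt
    · simp [PySem.Dict.getD, PySem.Dict.get?_mk_cons]
    · have hne : (k0 == kv.1) = false := by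
        refine beq_eq_false_iff_ne.mpr ?_
        intro e; exact h.1 (e ▸ List.mem_map_of_mem hmt)
      have h2 := ih h.2 hmt
      rw [PySem.Dict.getD, PySem.Dict.get?_mk_cons, hne] at *
      simpa [PySem.Dict.getD] using h2

/-- indexing into a column padded with `none` is plain (optional) indexing into the column -/
theorem pad_getD (c : List String) (d k : Nat) :
    (c.map some ++ List.replicate (d - c.length) none).getD k none = getElem? c k := by
  rcases lt_or_ge k c.length with h | h
  · rw [List.getD, List.getElem?_append_left (by simpa using h)]
    simp [h]
  · rw [List.getD, List.getElem?_append_right (by simpa using h)]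
    simp [List.getElem?_replicate, List.getElem?_eq_none h]
    split <;> rfl

/-- A's guarded cell equals B's cell on the padded column -/
theorem cell_eq (c : List String) (d k : Nat) :
    ("<td>" ++ ((if (k:Int) < (c.length:Int) ∧ PySem.List.pyGetD c (k:Int) "" ≠ ""
                 then PySem.List.pyGetD c (k:Int) "" else "NULL") ++ "</td>"))
    = pvCell ((c.map some ++ List.replicate (d - c.length) none).getD k none) := by
  rw [pad_getD]
  simp only [PySem.List.pyGetD_natCast, pvCell]
  rcases lt_or_ge k c.length with h | h
  · have hk : ((k:Int) < (c.length:Int)) := by exact_mod_cast h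
    simp only [List.getD_eq_getElem?_getD, List.getElem?_eq_getElem h, Option.getD_some]
    simp [hk, String.append_assoc]
  · have hk : ¬((k:Int) < (c.length:Int)) := by exact_mod_cast not_lt.mpr h
    simp [List.getElem?_eq_none h, hk]

/-- the transpose of a nonempty family of equal-length lists, row by row -/
theorem pvRowsOf_spec (d : Nat) (cols : List (List (Option String))) (hne : cols ≠ [])
    (h : ∀ c ∈ cols, c.length = d) :
    pvRowsOf cols = (List.range d).map (fun n => cols.map (fun c => c.getD n none)) := by
  induction d generalizing cols with
  | zero =>
    obtain ⟨c, cs, rfl⟩ := List.exists_cons_of_ne_nil hne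
    have hc : c = [] := List.eq_nil_of_length_eq_zero (h c (by simp))
    subst hc
    simp [pvRowsOf]
  | succ d ih =>
    obtain ⟨c, cs, rfl⟩ := List.exists_cons_of_ne_nil hne
    obtain ⟨x, c', rfl⟩ : ∃ x c', c = x :: c' := by
      cases c with
      | nil => exact absurd (h [] (by simp)) (by simp)
      | cons x c' => exact ⟨x, c', rfl⟩
    have hcs : ∀ c ∈ cs, ∃ y ys, c = y :: ys := by
      intro c hc
      cases c with
      | nil => exact absurd (h [] (by simp [hc])) (by simp)
      | cons y ys => exact ⟨y, ys, rfl⟩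
    rw [pvRowsOf]
    rw [ih (((x :: c') :: cs).map List.tail) (by simp)
        (by intro l hl
            simp only [List.mem_map] at hl
            obtain ⟨c0, hc0, rfl⟩ := hl
            have := h c0 hc0
            cases c0 with
            | nil => simp at this
            | cons y ys => simpa using this)]
    rw [List.range_succ_eq_map]
    simp only [List.map_cons, List.map_map]
    congr 1
    · congr 1
      apply List.map_congr_left
      intro c hc
      obtain ⟨y, ys, rfl⟩ := hcs c hc
      rfl
    · apply List.map_congr_left
      intro n _
      simp only [Function.comp]
      congr 1
      apply List.map_congr_left
      intro c hc
      obtain ⟨y, ys, rfl⟩ := hcs c hc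
      rfl

-- ===== VERDICT (by name: the statement is the Claim_ definition above) =====
theorem creaTabella_spec : Claim_equal_creaTabella := by
  intro diz _ hpre
  obtain ⟨hne, hnd⟩ := hpre
  unfold Spec_creaTabella
  have hlista : diz.map (fun kv => (PySem.Dict.mk diz).getD kv.1 []) = diz.map Prod.snd :=
    List.map_congr_left fun kv hm => lookup_self diz hnd kv hm
  simp only [creaTabella, creaTabella_alt,
    PySem.List.foldl_prod_mk
        (f := fun t (kv : String × List String) => t ++ "<th>" ++ kv.1 ++ "</th>")
        (g := fun l (kv : String × List String) => l ++ [(PySem.Dict.mk diz).getD kv.1 []]),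
    PySem.List.foldl_append_singleton_eq_map, List.nil_append, hlista]
  cases hA : PySem.List.max? (diz.map Prod.snd) (fun v => PySem.List.len v) with
  | none => exact absurd ((PySem.List.max?_eq_none_iff _ _).mp hA) (by simpa using hne)
  | some m =>
  cases hB : PySem.List.max? ((diz.map Prod.snd).map (fun c => PySem.List.len c)) (fun x => x) with
  | none => exact absurd ((PySem.List.max?_eq_none_iff _ _).mp hB) (by simpa using hne)
  | some depth =>
  have hmem := PySem.List.max?_mem hA
  have hmaxA := PySem.List.max?_isMax hA
  have hmaxB := PySem.List.max?_isMax hB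
  have hmemB := PySem.List.max?_mem hB
  have hdm : depth = (m.length : Int) := by
    apply le_antisymm
    · obtain ⟨c0, hc0, rfl⟩ := List.mem_map.mp hmemB
      simpa [PySem.List.len_eq] using hmaxA c0 hc0
    · have := hmaxB (PySem.List.len m) (List.mem_map_of_mem hmem)
      simpa [PySem.List.len_eq] using this
  have hlen : ∀ c ∈ diz.map Prod.snd, c.length ≤ m.length := by
    intro c hc
    have := hmaxA c hc
    simp only [PySem.List.len_eq] at this
    exact_mod_cast this
  have hdt : depth.toNat = m.length := by rw [hdm]; simp
  have hpadlen : ∀ p ∈ (diz.map Prod.snd).map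
      (fun c => c.map some ++ List.replicate (m.length - c.length) none), p.length = m.length := by
    intro p hp
    obtain ⟨c, hc, rfl⟩ := List.mem_map.mp hp
    have := hlen c hc
    simp [List.length_append]
    omega
  have hrows := pvRowsOf_spec m.length
    ((diz.map Prod.snd).map (fun c => c.map some ++ List.replicate (m.length - c.length) none))
    (by simpa using hne) hpadlen
  dsimp only
  rw [hdt, hrows]
  simp only [String.append_assoc, foldl_strapp, PySem.List.len_eq,
    PySem.List.pyRange_zero_natCast, List.map_map]
  have hpre : ∀ s : String,
      "" ++ ("<table class='w3-table w3-striped w3-bordered w3-hoverable'>" ++ ("<tr>" ++ s))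
      = "<table class='w3-table w3-striped w3-bordered w3-hoverable'><tr>" ++ s := by
    intro s
    rw [← String.append_assoc, ← String.append_assoc]
    exact congrArg (fun t => t ++ s) (by decide)
  rw [hpre]
  refine congrArg _ (congrArg _ (congrArg _ (congrArg (fun r => r ++ "</table>") ?_)))
  refine congrArg _ ?_
  apply List.map_congr_left
  intro k _
  simp only [Function.comp_apply]
  refine congrArg _ (congrArg (fun r => r ++ "</tr>") ?_)
  refine congrArg _ ?_
  rw [List.map_map]
  apply List.map_congr_left
  intro kv _
  simp only [Function.comp_apply]
  exact cell_eq kv.2 m.length k
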